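-- pv_equiv track=rewrite | github.com/hed-standard/hed-python | hedvalidation/hedvalidation/tag_validator.py | strip_off_units_if_valid
-- ===== SOURCE A (Python) =====
-- def strip_off_units_if_valid(tag_unit_values, tag_unit_class_units):
--     """Checks to see if the specified string has a valid unit, and removes it if so
--
--     Parameters
--     ----------
--     tag_unit_values: string
--         A unit tag with or without a unit class
--     tag_unit_class_units
--         A list of valid units for this tag
--     Returns
--     -------
--     string
--         A tag_unit_values with the valid unit removed, if one was present.
--         Otherwise, returns tag_unit_values
--
--     """
--     return_tag = tag_unit_values
--     tag_unit_class_units = sorted(tag_unit_class_units, key=len, reverse=True)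
--     for units in tag_unit_class_units:
--         if tag_unit_values.startswith(units):
--             return_tag = tag_unit_values[len(units):]
--             return_tag = return_tag.strip()
--             break
--         if tag_unit_values.endswith(units):
--             return_tag = tag_unit_values[:-len(units)]
--             return_tag = return_tag.strip()
--             break
--
--     return return_tag
-- ===== SOURCE B (Python) =====
-- def strip_off_units_if_valid(tag_unit_values, tag_unit_class_units):
--     """Single pass, no sort: keep the best matching unit, ranked by
--     (length, -position); longest wins, earliest listed wins ties."""
--     best = None  # (unit, index) of the best match so far
--     i = 0
--     for unit in tag_unit_class_units:
--         if tag_unit_values.startswith(unit) or tag_unit_values.endswith(unit):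
--             if best is None or (len(unit), -i) > (len(best[0]), -best[1]):
--                 best = (unit, i)
--         i += 1
--     if best is None:
--         return tag_unit_values
--     unit = best[0]
--     if tag_unit_values.startswith(unit):
--         return tag_unit_values[len(unit):].strip()
--     return tag_unit_values[:-len(unit)].strip()
-- ===== Notes on version B (the rewrite author's own statement) =====
-- stated objective: alternative
-- what changed: Replaces sort-then-first-match with a single unsorted pass that tracks the best matching unit by (length, earliest index) and strips it at the end.
import Mathlib
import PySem

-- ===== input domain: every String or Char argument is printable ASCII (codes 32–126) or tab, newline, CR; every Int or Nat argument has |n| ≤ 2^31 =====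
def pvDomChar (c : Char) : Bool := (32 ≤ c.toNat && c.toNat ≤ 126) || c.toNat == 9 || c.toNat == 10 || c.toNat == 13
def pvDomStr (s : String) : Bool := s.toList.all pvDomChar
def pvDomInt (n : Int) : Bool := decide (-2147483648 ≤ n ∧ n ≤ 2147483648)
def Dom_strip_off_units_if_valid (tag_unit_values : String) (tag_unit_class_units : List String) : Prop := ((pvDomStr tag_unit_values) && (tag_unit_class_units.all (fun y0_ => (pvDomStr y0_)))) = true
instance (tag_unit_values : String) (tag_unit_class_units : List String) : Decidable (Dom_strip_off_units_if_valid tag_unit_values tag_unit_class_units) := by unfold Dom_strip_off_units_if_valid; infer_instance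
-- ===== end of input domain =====

-- B replaces A's sort-then-first-match by a single unsorted pass keeping the best
-- matching unit ranked by (length, earliest index); same result, no sort.

-- ===== PORT A =====
-- A's loop with break: first unit of the sorted list that prefix/suffix-matches wins.
def pvALoop (tag_unit_values : String) : List String → String
  | [] => tag_unit_values
  | u :: rest =>
    if PySem.Str.startswith tag_unit_values u then
      PySem.Str.strip (PySem.Str.slice tag_unit_values (some (PySem.Str.len u)) none)
    else if PySem.Str.endswith tag_unit_values u then
      PySem.Str.strip (PySem.Str.slice tag_unit_values none (some (-(PySem.Str.len u))))
    else pvALoop tag_unit_values rest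

def strip_off_units_if_valid (tag_unit_values : String) (tag_unit_class_units : List String) : String :=
  pvALoop tag_unit_values (PySem.List.sorted tag_unit_class_units (fun u => PySem.Str.len u) true)

-- ===== PORT B =====
-- one step of B's loop: state is (running index, best (unit, index) so far)
def pvBStep (tag_unit_values : String) (st : Int × Option (String × Int)) (u : String) :
    Int × Option (String × Int) :=
  let i := st.1
  let best :=
    if PySem.Str.startswith tag_unit_values u || PySem.Str.endswith tag_unit_values u then
      match st.2 with
      | none => some (u, i)
      | some (b, j) =>
        -- Python tuple compare (len(u), -i) > (len(b), -j)
        if PySem.Str.len b < PySem.Str.len u ∨ (PySem.Str.len b = PySem.Str.len u ∧ -j < -i) then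
          some (u, i)
        else some (b, j)
    else st.2
  (i + 1, best)

def strip_off_units_if_valid_alt (tag_unit_values : String) (tag_unit_class_units : List String) : String :=
  match (tag_unit_class_units.foldl (pvBStep tag_unit_values) (0, none)).2 with
  | none => tag_unit_values
  | some (u, _) =>
    if PySem.Str.startswith tag_unit_values u then
      PySem.Str.strip (PySem.Str.slice tag_unit_values (some (PySem.Str.len u)) none)
    else
      PySem.Str.strip (PySem.Str.slice tag_unit_values none (some (-(PySem.Str.len u))))

-- ===== PRECONDITION & SPEC =====
def Spec_strip_off_units_if_valid (tag_unit_values : String) (tag_unit_class_units : List String) (out : String) : Prop := out = strip_off_units_if_valid_alt tag_unit_values tag_unit_class_units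
instance (tag_unit_values : String) (tag_unit_class_units : List String) (out : String) : Decidable (Spec_strip_off_units_if_valid tag_unit_values tag_unit_class_units out) := by unfold Spec_strip_off_units_if_valid; infer_instance

-- ===== CLAIM (what is proved, stated in full; the proofs are below) =====
def Claim_equal_strip_off_units_if_valid : Prop := ∀ (tag_unit_values : String) (tag_unit_class_units : List String), Dom_strip_off_units_if_valid tag_unit_values tag_unit_class_units → Spec_strip_off_units_if_valid tag_unit_values tag_unit_class_units (strip_off_units_if_valid tag_unit_values tag_unit_class_units)

-- ===== LEMMAS AND PROOFS =====

-- the matching predicate and the common "strip the winning unit" step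
def pvP (tv : String) (u : String) : Bool :=
  PySem.Str.startswith tv u || PySem.Str.endswith tv u

def pvApply (tv : String) (u : String) : String :=
  if PySem.Str.startswith tv u then
    PySem.Str.strip (PySem.Str.slice tv (some (PySem.Str.len u)) none)
  else
    PySem.Str.strip (PySem.Str.slice tv none (some (-(PySem.Str.len u))))

-- the abstract "best match" fold both sides are reduced to
def pvBestF (tv : String) (st : Option String) (u : String) : Option String :=
  if pvP tv u then
    match st with
    | none => some u
    | some b => if PySem.Str.len b < PySem.Str.len u then some u else some b
  else st

-- what one pvBStep does to the stored best match
def pvUpd (tv u : String) (i : Int) (st : Option (String × Int)) : Option (String × Int) :=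
  if PySem.Str.startswith tv u || PySem.Str.endswith tv u then
    match st with
    | none => some (u, i)
    | some (b, j) =>
      if PySem.Str.len b < PySem.Str.len u ∨ (PySem.Str.len b = PySem.Str.len u ∧ -j < -i) then
        some (u, i)
      else some (b, j)
  else st

theorem pvALoop_eq_find (tv : String) (l : List String) :
    pvALoop tv l = match l.find? (pvP tv) with
      | some u => pvApply tv u
      | none => tv := by
  induction l with
  | nil => rfl
  | cons u rest ih =>
    simp only [pvALoop, List.find?, pvP]
    by_cases hs : PySem.Str.startswith tv u = true
    · have hsc : PySem.Chars.startswith tv.toList u.toList = true := by simpa using hs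
      rw [hs]
      simp [pvApply, hsc]
    · rw [Bool.not_eq_true] at hs
      have hsc : PySem.Chars.startswith tv.toList u.toList = false := by simpa using hs
      rw [hs]
      by_cases he : PySem.Str.endswith tv u = true
      · rw [he]; simp [pvApply, hsc]
      · rw [Bool.not_eq_true] at he
        rw [he]
        simpa [pvP] using ih

theorem pvFind_insertBy (tv : String) (x : String) (s : List String)
    (hp : s.Pairwise (fun a b => PySem.Str.len b ≤ PySem.Str.len a)) :
    (PySem.List.insertBy (fun a b => decide (PySem.Str.len b < PySem.Str.len a)) x s).find? (pvP tv)
      = pvBestF tv (s.find? (pvP tv)) x := by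
  induction s with
  | nil =>
    simp only [PySem.List.insertBy, List.find?, pvBestF]
    by_cases hx : pvP tv x = true
    · rw [hx]; simp
    · rw [Bool.not_eq_true] at hx; rw [hx]; simp
  | cons y s ih =>
    have hhead : ∀ b ∈ s, PySem.Str.len b ≤ PySem.Str.len y :=
      fun b hb => (List.pairwise_cons.mp hp).1 b hb
    have hps : s.Pairwise (fun a b => PySem.Str.len b ≤ PySem.Str.len a) :=
      (List.pairwise_cons.mp hp).2
    simp only [PySem.List.insertBy, decide_eq_true_eq]
    by_cases hlt : PySem.Str.len y < PySem.Str.len x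
    · rw [if_pos hlt]
      simp only [List.find?]
      by_cases hx : pvP tv x = true
      · rw [hx]
        simp only [pvBestF, hx, if_true]
        cases hy : pvP tv y with
        | true =>
          show some x = if PySem.Str.len y < PySem.Str.len x then some x else some y
          rw [if_pos hlt]
        | false =>
          cases hfind : List.find? (pvP tv) s with
          | none => rfl
          | some b =>
            have hb : b ∈ s := List.mem_of_find?_eq_some hfind
            have hbx : PySem.Str.len b < PySem.Str.len x := lt_of_le_of_lt (hhead b hb) hlt
            show some x = if PySem.Str.len b < PySem.Str.len x then some x else some b
            rw [if_pos hbx]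
      · rw [Bool.not_eq_true] at hx
        rw [hx]
        simp only [pvBestF, hx, Bool.false_eq_true, if_false]
    · rw [if_neg hlt]
      simp only [List.find?]
      cases hy : pvP tv y with
      | true =>
        simp only [pvBestF]
        by_cases hx : pvP tv x = true
        · show some y = if pvP tv x = true then
              (if PySem.Str.len y < PySem.Str.len x then some x else some y) else some y
          rw [if_pos hx, if_neg hlt]
        · rw [Bool.not_eq_true] at hx
          show some y = if pvP tv x = true then
              (if PySem.Str.len y < PySem.Str.len x then some x else some y) else some y
          rw [hx]
          simp
      | false =>
        exact ih hps

theorem pvFind_sorted (tv : String) (xs : List String) :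
    (PySem.List.sorted xs (fun u => PySem.Str.len u) true).find? (pvP tv)
      = xs.foldl (pvBestF tv) none := by
  induction xs using List.reverseRecOn with
  | nil => rfl
  | append_singleton xs x ih =>
    rw [PySem.List.sorted_rev_eq_foldl_insertBy] at ih ⊢
    rw [List.foldl_append, List.foldl_append]
    simp only [List.foldl_cons, List.foldl_nil]
    have hp : (List.foldl (fun acc x =>
        PySem.List.insertBy (fun a b => decide (PySem.Str.len b < PySem.Str.len a)) x acc) [] xs).Pairwise
        (fun a b => PySem.Str.len b ≤ PySem.Str.len a) := by
      have := PySem.List.sorted_pairwise_rev xs (fun u => PySem.Str.len u)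
      rwa [PySem.List.sorted_rev_eq_foldl_insertBy] at this
    rw [pvFind_insertBy tv x _ hp, ih]

theorem pvBStep_eq_pvUpd (tv u : String) (i : Int) (st : Option (String × Int)) :
    pvBStep tv (i, st) u = (i + 1, pvUpd tv u i st) := rfl

theorem pvUpd_bound (tv u : String) (i : Int) (st : Option (String × Int))
    (hst : ∀ b j, st = some (b, j) → j < i) :
    ∀ b j, pvUpd tv u i st = some (b, j) → j < i + 1 := by
  intro b j h
  unfold pvUpd at h
  split at h
  · cases st with
    | none => cases h; omega
    | some p =>
      obtain ⟨b0, j0⟩ := p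
      have hj0 : j0 < i := hst b0 j0 rfl
      simp only at h
      split at h <;> (cases h; omega)
  · have := hst b j h; omega

theorem pvUpd_map (tv u : String) (i : Int) (st : Option (String × Int))
    (hst : ∀ b j, st = some (b, j) → j < i) :
    (pvUpd tv u i st).map Prod.fst = pvBestF tv (st.map Prod.fst) u := by
  unfold pvUpd pvBestF pvP
  by_cases hm : (PySem.Str.startswith tv u || PySem.Str.endswith tv u) = true
  · rw [hm]
    cases st with
    | none => rfl
    | some p =>
      obtain ⟨b, j⟩ := p
      have hj : j < i := hst b j rfl
      simp only [Option.map_some]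
      by_cases hlt : PySem.Str.len b < PySem.Str.len u
      · rw [if_pos (Or.inl hlt), if_pos hlt]; rfl
      · have hcond : ¬(PySem.Str.len b < PySem.Str.len u ∨
            (PySem.Str.len b = PySem.Str.len u ∧ -j < -i)) := by
          rintro (h | ⟨heq, hj2⟩)
          · exact hlt h
          · omega
        rw [if_neg hcond, if_neg hlt]
        rfl
  · rw [Bool.not_eq_true] at hm
    rw [hm]
    simp

theorem pvBFold (tv : String) (xs : List String) :
    ∀ (i : Int) (st : Option (String × Int)),
      (∀ b j, st = some (b, j) → j < i) →
      ((xs.foldl (pvBStep tv) (i, st)).2).map Prod.fst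
        = xs.foldl (pvBestF tv) (st.map Prod.fst) := by
  induction xs with
  | nil => intro i st _; rfl
  | cons u xs ih =>
    intro i st hst
    simp only [List.foldl_cons, pvBStep_eq_pvUpd]
    rw [ih (i + 1) (pvUpd tv u i st) (pvUpd_bound tv u i st hst)]
    rw [pvUpd_map tv u i st hst]

-- ===== VERDICT (by name: the statement is the Claim_ definition above) =====
theorem strip_off_units_if_valid_spec : Claim_equal_strip_off_units_if_valid := by
  intro tv units _
  unfold Spec_strip_off_units_if_valid strip_off_units_if_valid strip_off_units_if_valid_alt
  rw [pvALoop_eq_find, pvFind_sorted]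
  have hB := pvBFold tv units 0 none (by intro b j h; cases h)
  simp only [Option.map_none] at hB
  rw [← hB]
  cases hfold : (units.foldl (pvBStep tv) (0, none)).2 with
  | none => rfl
  | some p =>
    obtain ⟨u, j⟩ := p
    simp only [Option.map_some]
    rfl
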